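-- pv_equiv track=rewrite | github.com/pong-du/algorithms | Programmers/258712.py | solution
-- ===== SOURCE A (Python) =====
-- def solution(friends, gifts):
--     answer = 0
--     friend_dict = dict()
--     for friend in friends:
--         friend_dict[friend] ={v : 0 for v in friends}
--         friend_dict[friend]['idx'] = 0 # 선물 지수
--
--     for gift in gifts:
--         frm, to = gift.split()
--         friend_dict[frm][to] += 1
--         friend_dict[frm]['idx'] += 1
--         friend_dict[to]['idx'] += -1
--
--     for to in friends:
--         cnt = 0
--         for frm in friends:
--             if to != frm:
--                 if friend_dict[to][frm] == friend_dict[frm][to]: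
--                     if friend_dict[to]['idx'] > friend_dict[frm]['idx'] :
--                         cnt += 1
--                 elif friend_dict[to][frm] > friend_dict[frm][to]:
--                     cnt += 1
--         answer = max(answer, cnt)
--
--     return answer
-- ===== SOURCE B (Python) =====
-- def solution(friends, gifts):
--     # tally directed gift counts and each friend's gift index in one pass
--     give = {}
--     idx = {f: 0 for f in friends}
--     for gift in gifts:
--         frm, to = gift.split()
--         give[(frm, to)] = give.get((frm, to), 0) + 1
--         idx[frm] += 1
--         idx[to] -= 1
--     # baseline: as if every pair were settled by gift index alone,
--     # wins[u] = number of friends with a strictly smaller index (rank in sorted order)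
--     rank = {}
--     for i, v in enumerate(sorted(idx.values())):
--         if v not in rank:
--             rank[v] = i
--     wins = {u: rank[idx[u]] for u in friends}
--     # correct only the pairs actually decided by gift counts (visited once, at the
--     # winner's key: give[u, v] > give[(v, u)] picks exactly one direction per pair)
--     for (u, v), a in give.items():
--         if a > give.get((v, u), 0):
--             if idx[u] > idx[v]:
--                 wins[u] -= 1
--             elif idx[v] > idx[u]:
--                 wins[v] -= 1
--             wins[u] += 1
--     return max(wins.values(), default=0)
-- ===== Notes on version B (the rewrite author's own statement) =====
-- stated objective: alternative
-- what changed: A builds an FxF nested dict and rescans every ordered friend pair with an inline running max; B tallies flat (giver,receiver) counts and per-friend indices in one pass, derives each friend's baseline win count as its rank in the sorted index list (as if every pair were index-decided), then corrects only the pairs that actually have unequal gift counts by one pass over the counter, and takes the max (a tally/sort/correct shape instead of a quadratic rescan); …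
-- outside the precondition, e.g. on solution(['c', 'b', 'a', 'idx'], ['idx c', 'a c']): A returns 3, B returns 2; on solution(['a', 'b', 'b'], ['a b']): A returns 2, B returns 1
import Mathlib
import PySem

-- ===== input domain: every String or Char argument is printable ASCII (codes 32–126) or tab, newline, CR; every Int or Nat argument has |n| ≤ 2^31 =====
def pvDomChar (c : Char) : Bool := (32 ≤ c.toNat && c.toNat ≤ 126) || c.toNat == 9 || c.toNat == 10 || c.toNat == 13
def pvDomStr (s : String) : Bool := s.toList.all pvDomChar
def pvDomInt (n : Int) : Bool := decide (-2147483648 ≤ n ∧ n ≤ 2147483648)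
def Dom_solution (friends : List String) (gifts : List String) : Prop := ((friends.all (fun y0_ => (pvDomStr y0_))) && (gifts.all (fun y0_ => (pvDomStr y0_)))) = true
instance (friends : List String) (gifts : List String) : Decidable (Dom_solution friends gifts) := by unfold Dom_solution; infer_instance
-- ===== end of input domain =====

-- B replaces A's F×F nested dict and per-row rescans by flat tallies, a sort-based rank
-- baseline (each friend's wins as if every pair were settled by gift index), and a single
-- correction pass over the pairs that actually exchanged unequal gift counts (alternative algorithm).

-- ===== PORT A =====
-- body of A's gift loop (frm, tgt = gift.split(); three '+=' updates); getD 0/1 is the tuple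
-- unpacking, exact under Pre_ (every gift splits into exactly two words, both present as keys)
def pvStepA (d : PySem.Dict String (PySem.Dict String Int)) (gift : String) :
    PySem.Dict String (PySem.Dict String Int) :=
  let parts := PySem.Str.split₀ gift
  let frm := parts.getD 0 ""
  let tgt := parts.getD 1 ""   -- Python's `to`
  let d := d.modify frm PySem.Dict.empty (fun m => m.modify tgt 0 (· + 1))
  let d := d.modify frm PySem.Dict.empty (fun m => m.modify "idx" 0 (· + 1))
  d.modify tgt PySem.Dict.empty (fun m => m.modify "idx" 0 (· + (-1)))

-- A's inner 'for frm in friends' loop computing cnt for one 'to'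
def pvCntA (fd : PySem.Dict String (PySem.Dict String Int)) (friends : List String)
    (tgt : String) : Int :=
  friends.foldl (fun cnt frm =>
    if tgt ≠ frm then
      if (fd.getD tgt PySem.Dict.empty).getD frm 0 = (fd.getD frm PySem.Dict.empty).getD tgt 0 then
        if (fd.getD tgt PySem.Dict.empty).getD "idx" 0 > (fd.getD frm PySem.Dict.empty).getD "idx" 0
        then cnt + 1 else cnt
      else if (fd.getD tgt PySem.Dict.empty).getD frm 0 > (fd.getD frm PySem.Dict.empty).getD tgt 0
      then cnt + 1 else cnt
    else cnt) 0

def solution (friends : List String) (gifts : List String) : Int :=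
  let friend_dict : PySem.Dict String (PySem.Dict String Int) :=
    friends.foldl (fun d friend =>
      d.insert friend
        ((friends.foldl (fun m v => m.insert v (0 : Int)) PySem.Dict.empty).insert "idx" 0))
      PySem.Dict.empty
  let friend_dict := gifts.foldl pvStepA friend_dict
  friends.foldl (fun answer tgt => max answer (pvCntA friend_dict friends tgt)) 0

-- ===== PORT B =====
-- body of B's gift loop: flat pair counter 'give' and per-friend gift index 'idx'
-- (idx[frm] += 1 ported as modify with default 0: exact under Pre_, where frm is a key)
def pvStepB (st : PySem.Dict (String × String) Int × PySem.Dict String Int) (gift : String) :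
    PySem.Dict (String × String) Int × PySem.Dict String Int :=
  let parts := PySem.Str.split₀ gift
  let frm := parts.getD 0 ""   -- tuple unpacking, exact under Pre_
  let tgt := parts.getD 1 ""   -- Python's `to`
  let give := st.1.insert (frm, tgt) (st.1.getD (frm, tgt) 0 + 1)
  let idx := st.2.modify frm 0 (· + 1)
  (give, idx.modify tgt 0 (· - 1))

-- body of B's rank loop: 'if v not in rank: rank[v] = i'
def pvRankStep (r : PySem.Dict Int Int) (iv : Int × Int) : PySem.Dict Int Int :=
  if r.contains iv.2 then r else r.insert iv.2 iv.1

-- body of B's correction loop over give.items()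
-- (wins[u] -= 1 etc. ported as modify with default 0: exact under Pre_, where u, v are keys)
def pvFixStep (give : PySem.Dict (String × String) Int) (idx : PySem.Dict String Int)
    (w : PySem.Dict String Int) (kv : (String × String) × Int) : PySem.Dict String Int :=
  let u := kv.1.1
  let v := kv.1.2
  let a := kv.2
  if a > give.getD (v, u) 0 then
    let w := if idx.getD u 0 > idx.getD v 0 then w.modify u 0 (· - 1)
             else if idx.getD v 0 > idx.getD u 0 then w.modify v 0 (· - 1) else w
    w.modify u 0 (· + 1)
  else w

def solution_alt (friends : List String) (gifts : List String) : Int :=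
  let idx0 := friends.foldl (fun d f => d.insert f (0 : Int)) PySem.Dict.empty
  let st := gifts.foldl pvStepB (PySem.Dict.empty, idx0)
  let give := st.1
  let idx := st.2
  let rank := (PySem.List.enumerate (PySem.List.sorted idx.values (fun y => y) false)).foldl
    pvRankStep PySem.Dict.empty
  let wins := friends.foldl (fun w u => w.insert u (rank.getD (idx.getD u 0) 0)) PySem.Dict.empty
  let wins := give.items.foldl (pvFixStep give idx) wins
  (PySem.List.max? wins.values (fun y => y)).getD 0

-- ===== PRECONDITION & SPEC =====
-- Pre_ excludes (i) inputs on which A raises: a gift that does not split into exactly two words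
-- (ValueError) or names a giver/receiver absent from friends (KeyError); and (ii), once gifts
-- are actually tallied, friends lists with duplicate names (A's positional rescan counts a
-- duplicated opponent several times — an artefact of iterating list positions over a dict keyed
-- by name) or containing the literal name "idx" (which collides with the sentinel key of A's
-- inner dicts), on which A's value is accidental (see cites); with no gifts both corners are
-- harmless and stay inside Pre_.
def Pre_solution (friends : List String) (gifts : List String) : Prop :=
  (gifts = [] ∨ (friends.Nodup ∧ "idx" ∉ friends)) ∧
    ∀ g ∈ gifts, (PySem.Str.split₀ g).length = 2 ∧
      (PySem.Str.split₀ g).getD 0 "" ∈ friends ∧ (PySem.Str.split₀ g).getD 1 "" ∈ friends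

instance (friends : List String) (gifts : List String) : Decidable (Pre_solution friends gifts) := by
  unfold Pre_solution; infer_instance

def pvWitness_solution : List String × List String := (["a", "b"], ["a b", "b a", "a b"])

def Spec_solution (friends : List String) (gifts : List String) (out : Int) : Prop :=
  out = solution_alt friends gifts
instance (friends : List String) (gifts : List String) (out : Int) :
    Decidable (Spec_solution friends gifts out) := by unfold Spec_solution; infer_instance

-- ===== CLAIM (what is proved, stated in full; the proofs are below) =====
def Claim_equal_solution : Prop := ∀ (friends : List String) (gifts : List String),
  Dom_solution friends gifts → Pre_solution friends gifts →
    Spec_solution friends gifts (solution friends gifts)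

-- ===== LEMMAS AND PROOFS =====

-- the parsed (giver, receiver) pair of a gift
def pvParse (g : String) : String × String :=
  ((PySem.Str.split₀ g).getD 0 "", (PySem.Str.split₀ g).getD 1 "")

-- number of gifts from u to v
def pvG (gifts : List String) (u v : String) : Int := ((gifts.map pvParse).count (u, v) : Int)

-- gift index of u: given minus received
def pvI (gifts : List String) (u : String) : Int :=
  (((gifts.map pvParse).map Prod.fst).count u : Int) - (((gifts.map pvParse).map Prod.snd).count u : Int)

-- u beats v (strictly more gifts given, or tie on gifts and strictly larger gift index)
abbrev pvWin (gifts : List String) (u v : String) : Prop :=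
  pvG gifts u v > pvG gifts v u ∨ (pvG gifts u v = pvG gifts v u ∧ pvI gifts u > pvI gifts v)

-- contribution of the correction step at counter key k to friend x's win count
def pvContrib (give : PySem.Dict (String × String) Int) (idx : PySem.Dict String Int)
    (x : String) (k : String × String) : Int :=
  if give.getD k 0 > give.getD (k.2, k.1) 0 then
    (if x = k.1 then 1 else 0) +
      (if idx.getD k.1 0 > idx.getD k.2 0 then (if x = k.1 then -1 else 0)
       else if idx.getD k.2 0 > idx.getD k.1 0 then (if x = k.2 then -1 else 0) else 0)
  else 0

-- ---- generic fold / sum facts ----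

theorem pv_getD_foldl_insertf_not_mem {ν : Type} (f : String → ν) (e : ν) :
    ∀ (l : List String) (d : PySem.Dict String ν) (u : String), u ∉ l →
      (l.foldl (fun d x => d.insert x (f x)) d).getD u e = d.getD u e := by
  intro l
  induction l with
  | nil => intro d u _; rfl
  | cons a t ih =>
    intro d u hu
    simp only [List.mem_cons, not_or] at hu
    simp only [List.foldl_cons]
    rw [ih _ _ hu.2, PySem.Dict.getD_insert_of_ne d (f a) e hu.1]

theorem pv_getD_foldl_insertf {ν : Type} (f : String → ν) (e : ν) :
    ∀ (l : List String) (d : PySem.Dict String ν) (u : String), u ∈ l →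
      (l.foldl (fun d x => d.insert x (f x)) d).getD u e = f u := by
  intro l
  induction l with
  | nil => intro d u h; exact absurd h (List.not_mem_nil)
  | cons a t ih =>
    intro d u hu
    by_cases ht : u ∈ t
    · exact ih _ _ ht
    · have hf : u = a := by rcases List.mem_cons.mp hu with h | h; exact h; exact absurd h ht
      subst hf
      simp only [List.foldl_cons]
      rw [pv_getD_foldl_insertf_not_mem f e t _ _ ht, PySem.Dict.getD_insert_self]

theorem pv_foldl_max_spec : ∀ (l : List Int) (c : Int),
    c ≤ l.foldl max c ∧ (∀ x ∈ l, x ≤ l.foldl max c) ∧ (l.foldl max c = c ∨ l.foldl max c ∈ l) := by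
  intro l
  induction l with
  | nil => intro c; refine ⟨le_refl _, by simp, Or.inl rfl⟩
  | cons a t ih =>
    intro c
    obtain ⟨h1, h2, h3⟩ := ih (max c a)
    simp only [List.foldl_cons]
    refine ⟨le_trans (le_max_left _ _) h1, ?_, ?_⟩
    · intro x hx
      rcases List.mem_cons.mp hx with h | h
      · subst h; exact le_trans (le_max_right _ _) h1
      · exact h2 x h
    · rcases h3 with h | h
      · rcases max_choice c a with hc | hc
        · exact Or.inl (by rw [h, hc])
        · exact Or.inr (by rw [h, hc]; exact List.mem_cons_self)
      · exact Or.inr (List.mem_cons_of_mem _ h)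

theorem pv_max_eq (L1 L2 : List Int) (hmem : ∀ x, x ∈ L1 ↔ x ∈ L2) (hpos : ∀ x ∈ L1, 0 ≤ x) :
    L1.foldl max 0 = (PySem.List.max? L2 (fun y => y)).getD 0 := by
  obtain ⟨h0, hub, hmem1⟩ := pv_foldl_max_spec L1 0
  rcases hL2 : L2 with _ | ⟨y, ys⟩
  · have hnil : L1 = [] := by
      cases hL1 : L1 with
      | nil => rfl
      | cons a t =>
        exfalso
        have : a ∈ L2 := (hmem a).mp (by rw [hL1]; exact List.mem_cons_self)
        rw [hL2] at this
        exact absurd this (List.not_mem_nil)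
    subst hnil; rfl
  · rw [PySem.List.max?_id_cons y ys]
    obtain ⟨h1', h2', h3'⟩ := pv_foldl_max_spec ys y
    have hmm : ys.foldl max y ∈ L1 := by
      apply (hmem _).mpr
      rw [hL2]
      rcases h3' with h | h
      · rw [h]; exact List.mem_cons_self
      · exact List.mem_cons_of_mem _ h
    have hub2 : ∀ x ∈ L1, x ≤ ys.foldl max y := by
      intro x hx
      have hx2 : x ∈ y :: ys := by rw [← hL2]; exact (hmem x).mp hx
      rcases List.mem_cons.mp hx2 with h | h
      · subst h; exact h1'
      · exact h2' x h
    simp only [Option.getD_some]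
    rcases hmem1 with h | h
    · have := hpos _ hmm
      have := hub _ hmm
      omega
    · have ha := hub2 _ h
      have hb := hub _ hmm
      omega

theorem pv_sum_spike {α : Type} [DecidableEq α] :
    ∀ (ns : List α), ns.Nodup → ∀ (x : α), x ∈ ns →
      ∀ (c : α → Int), (ns.map (fun v => if v = x then c v else 0)).sum = c x := by
  intro ns
  induction ns with
  | nil => intro _ x hx; exact absurd hx (List.not_mem_nil)
  | cons a t ih =>
    intro hnd x hx c
    simp only [List.nodup_cons] at hnd
    simp only [List.map_cons, List.sum_cons]
    rcases List.mem_cons.mp hx with h | h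
    · subst h
      rw [if_pos rfl]
      have : (t.map (fun v => if v = x then c v else 0)).sum = 0 := by
        apply List.sum_eq_zero
        intro y hy
        simp only [List.mem_map] at hy
        obtain ⟨v, hv, hvy⟩ := hy
        rw [if_neg (by rintro rfl; exact hnd.1 hv)] at hvy
        omega
      omega
    · rw [if_neg (by rintro rfl; exact hnd.1 h), ih hnd.2 x h c]
      omega

theorem pv_sum_ite_eq {α : Type} [DecidableEq α] :
    ∀ (K : List α), K.Nodup → ∀ (k0 : α) (c : Int),
      (K.map (fun k => if k = k0 then c else 0)).sum = if k0 ∈ K then c else 0 := by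
  intro K
  induction K with
  | nil => intro _ k0 c; simp
  | cons a t ih =>
    intro hnd k0 c
    simp only [List.nodup_cons] at hnd
    simp only [List.map_cons, List.sum_cons, ih hnd.2 k0 c]
    by_cases ha : a = k0
    · subst ha
      rw [if_pos rfl, if_neg (fun h => hnd.1 h), if_pos List.mem_cons_self]
      omega
    · rw [if_neg ha]
      by_cases ht : k0 ∈ t
      · rw [if_pos ht, if_pos (List.mem_cons_of_mem _ ht)]
        omega
      · rw [if_neg ht, if_neg (by
          intro hmem
          rcases List.mem_cons.mp hmem with h | h
          · exact ha h.symm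
          · exact ht h)]
        omega

theorem pv_sum_swap {β γ : Type} :
    ∀ (K : List β) (M : List γ) (g : β → γ → Int),
      (K.map (fun k => (M.map (g k)).sum)).sum = (M.map (fun v => (K.map (fun k => g k v)).sum)).sum := by
  intro K
  induction K with
  | nil =>
    intro M g
    simp
  | cons a t ih =>
    intro M g
    simp only [List.map_cons, List.sum_cons, ih M g]
    rw [← PySem.List.sum_map_add_int]

-- ---- A's dict: one pvStepA update, read back at a non-"idx" inner key ----
theorem pv_stepA_core (fd : PySem.Dict String (PySem.Dict String Int)) (frm tgt u v : String)
    (hvidx : v ≠ "idx") (hfidx : frm ≠ "idx") (htidx : tgt ≠ "idx") :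
    ((((fd.modify frm PySem.Dict.empty (fun m => m.modify tgt 0 (· + 1))).modify frm
        PySem.Dict.empty (fun m => m.modify "idx" 0 (· + 1))).modify tgt PySem.Dict.empty
        (fun m => m.modify "idx" 0 (· + (-1)))).getD u PySem.Dict.empty).getD v 0
      = (fd.getD u PySem.Dict.empty).getD v 0 + (if u = frm ∧ v = tgt then 1 else 0) := by
  by_cases h4 : frm = tgt
  · subst h4
    by_cases h3 : u = frm <;> by_cases h2 : v = frm <;>
      simp [PySem.Dict.getD_modify, h3, h2, hvidx, hfidx] <;> omega
  · by_cases h3 : u = tgt <;> by_cases h1 : u = frm <;> by_cases h2 : v = tgt <;>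
      simp [PySem.Dict.getD_modify, h1, h2, h3, h4, Ne.symm h4, hvidx, hfidx, htidx] <;> omega

-- one pvStepA update, read back at the sentinel key "idx"
theorem pv_stepA_core_I (fd : PySem.Dict String (PySem.Dict String Int)) (frm tgt u : String)
    (hfidx : frm ≠ "idx") (htidx : tgt ≠ "idx") :
    ((((fd.modify frm PySem.Dict.empty (fun m => m.modify tgt 0 (· + 1))).modify frm
        PySem.Dict.empty (fun m => m.modify "idx" 0 (· + 1))).modify tgt PySem.Dict.empty
        (fun m => m.modify "idx" 0 (· + (-1)))).getD u PySem.Dict.empty).getD "idx" 0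
      = (fd.getD u PySem.Dict.empty).getD "idx" 0 +
          (if u = frm then 1 else 0) + (if u = tgt then -1 else 0) := by
  by_cases h4 : frm = tgt
  · subst h4
    by_cases h3 : u = frm <;>
      simp [PySem.Dict.getD_modify, h3, Ne.symm hfidx] <;> omega
  · by_cases h3 : u = tgt <;> by_cases h1 : u = frm <;>
      simp [PySem.Dict.getD_modify, h1, h3, h4, Ne.symm h4, Ne.symm hfidx, Ne.symm htidx] <;> omega

-- ---- A's gift loop ----

theorem pv_A_loop_G (fr : List String) (hidx : "idx" ∉ fr) :
    ∀ (l : List String), (∀ g ∈ l, (pvParse g).1 ∈ fr ∧ (pvParse g).2 ∈ fr) →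
      ∀ (fd : PySem.Dict String (PySem.Dict String Int)) (u v : String), u ∈ fr → v ∈ fr →
        ((l.foldl pvStepA fd).getD u PySem.Dict.empty).getD v 0 =
          (fd.getD u PySem.Dict.empty).getD v 0 + ((l.map pvParse).count (u, v) : Int) := by
  intro l
  induction l with
  | nil => intro _ fd u v _ _; simp
  | cons g t ih =>
    intro hl fd u v hu hv
    have hg := hl g List.mem_cons_self
    have hlt : ∀ x ∈ t, (pvParse x).1 ∈ fr ∧ (pvParse x).2 ∈ fr :=
      fun x hx => hl x (List.mem_cons_of_mem _ hx)
    simp only [List.foldl_cons]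
    rw [ih hlt _ u v hu hv]
    have hstep : ((pvStepA fd g).getD u PySem.Dict.empty).getD v 0 =
        (fd.getD u PySem.Dict.empty).getD v 0 +
          (if u = (pvParse g).1 ∧ v = (pvParse g).2 then 1 else 0) := by
      show ((((fd.modify (pvParse g).1 PySem.Dict.empty
            (fun m => m.modify (pvParse g).2 0 (· + 1))).modify (pvParse g).1
            PySem.Dict.empty (fun m => m.modify "idx" 0 (· + 1))).modify (pvParse g).2
            PySem.Dict.empty (fun m => m.modify "idx" 0 (· + (-1)))).getD u
            PySem.Dict.empty).getD v 0 = _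
      exact pv_stepA_core fd _ _ u v (fun h => hidx (h ▸ hv)) (fun h => hidx (h ▸ hg.1))
        (fun h => hidx (h ▸ hg.2))
    rw [hstep]
    simp only [List.map_cons, List.count_cons]
    rcases hp : pvParse g with ⟨a, b⟩
    by_cases e1 : u = a <;> by_cases e2 : v = b
    · subst e1; subst e2; simp; push_cast; omega
    · have e2' : b ≠ v := fun h => e2 h.symm
      subst e1; simp [e2, e2']
    · have e1' : a ≠ u := fun h => e1 h.symm
      subst e2; simp [e1, e1']
    · have e1' : a ≠ u := fun h => e1 h.symm
      simp [e1, e1', e2]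

theorem pv_A_loop_I (fr : List String) (hidx : "idx" ∉ fr) :
    ∀ (l : List String), (∀ g ∈ l, (pvParse g).1 ∈ fr ∧ (pvParse g).2 ∈ fr) →
      ∀ (fd : PySem.Dict String (PySem.Dict String Int)) (u : String), u ∈ fr →
        ((l.foldl pvStepA fd).getD u PySem.Dict.empty).getD "idx" 0 =
          (fd.getD u PySem.Dict.empty).getD "idx" 0 +
            (((l.map pvParse).map Prod.fst).count u : Int) -
            (((l.map pvParse).map Prod.snd).count u : Int) := by
  intro l
  induction l with
  | nil => intro _ fd u _; simp
  | cons g t ih =>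
    intro hl fd u hu
    have hg := hl g List.mem_cons_self
    have hlt : ∀ x ∈ t, (pvParse x).1 ∈ fr ∧ (pvParse x).2 ∈ fr :=
      fun x hx => hl x (List.mem_cons_of_mem _ hx)
    simp only [List.foldl_cons]
    rw [ih hlt _ u hu]
    have hstep : ((pvStepA fd g).getD u PySem.Dict.empty).getD "idx" 0 =
        (fd.getD u PySem.Dict.empty).getD "idx" 0 +
          (if u = (pvParse g).1 then 1 else 0) + (if u = (pvParse g).2 then -1 else 0) := by
      show ((((fd.modify (pvParse g).1 PySem.Dict.empty
            (fun m => m.modify (pvParse g).2 0 (· + 1))).modify (pvParse g).1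
            PySem.Dict.empty (fun m => m.modify "idx" 0 (· + 1))).modify (pvParse g).2
            PySem.Dict.empty (fun m => m.modify "idx" 0 (· + (-1)))).getD u
            PySem.Dict.empty).getD "idx" 0 = _
      exact pv_stepA_core_I fd _ _ u (fun h => hidx (h ▸ hg.1)) (fun h => hidx (h ▸ hg.2))
    rw [hstep]
    simp only [List.map_map, List.map_cons, List.count_cons, Function.comp]
    rcases hp : pvParse g with ⟨a, b⟩
    by_cases e1 : u = a <;> by_cases e2 : u = b
    · subst e1; rw [← e2]; simp; push_cast; omega
    · have e2' : b ≠ u := fun h => e2 h.symm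
      subst e1; simp [e2, e2']; try push_cast; try omega
    · have e1' : a ≠ u := fun h => e1 h.symm
      subst e2; simp [e1, e1']; try push_cast; try omega
    · have e1' : a ≠ u := fun h => e1 h.symm
      have e2' : b ≠ u := fun h => e2 h.symm
      simp [e1, e2, e1', e2']; try push_cast; try omega

-- ---- A's counting loop as a sum ----

theorem pv_cntA_sum (fd : PySem.Dict String (PySem.Dict String Int)) (fr : List String)
    (tgt : String) :
    pvCntA fd fr tgt = (fr.map (fun frm =>
      if tgt ≠ frm ∧
          ((fd.getD tgt PySem.Dict.empty).getD frm 0 > (fd.getD frm PySem.Dict.empty).getD tgt 0 ∨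
            ((fd.getD tgt PySem.Dict.empty).getD frm 0 = (fd.getD frm PySem.Dict.empty).getD tgt 0 ∧
              (fd.getD tgt PySem.Dict.empty).getD "idx" 0 > (fd.getD frm PySem.Dict.empty).getD "idx" 0))
      then (1 : Int) else 0)).sum := by
  unfold pvCntA
  have aux : ∀ (l : List String) (c : Int), l.foldl (fun cnt frm =>
      if tgt ≠ frm then
        if (fd.getD tgt PySem.Dict.empty).getD frm 0 = (fd.getD frm PySem.Dict.empty).getD tgt 0 then
          if (fd.getD tgt PySem.Dict.empty).getD "idx" 0 > (fd.getD frm PySem.Dict.empty).getD "idx" 0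
          then cnt + 1 else cnt
        else if (fd.getD tgt PySem.Dict.empty).getD frm 0 > (fd.getD frm PySem.Dict.empty).getD tgt 0
        then cnt + 1 else cnt
      else cnt) c = c + (l.map (fun frm =>
        if tgt ≠ frm ∧
            ((fd.getD tgt PySem.Dict.empty).getD frm 0 > (fd.getD frm PySem.Dict.empty).getD tgt 0 ∨
              ((fd.getD tgt PySem.Dict.empty).getD frm 0 = (fd.getD frm PySem.Dict.empty).getD tgt 0 ∧
                (fd.getD tgt PySem.Dict.empty).getD "idx" 0 > (fd.getD frm PySem.Dict.empty).getD "idx" 0))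
        then (1 : Int) else 0)).sum := by
    intro l
    induction l with
    | nil => intro c; simp
    | cons a r ih =>
      intro c
      simp only [List.foldl_cons, List.map_cons, List.sum_cons]
      rw [ih]
      have hstep : (if tgt ≠ a then
          if (fd.getD tgt PySem.Dict.empty).getD a 0 = (fd.getD a PySem.Dict.empty).getD tgt 0 then
            if (fd.getD tgt PySem.Dict.empty).getD "idx" 0 > (fd.getD a PySem.Dict.empty).getD "idx" 0
            then c + 1 else c
          else if (fd.getD tgt PySem.Dict.empty).getD a 0 > (fd.getD a PySem.Dict.empty).getD tgt 0
          then c + 1 else c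
        else c) = c + (if tgt ≠ a ∧
            ((fd.getD tgt PySem.Dict.empty).getD a 0 > (fd.getD a PySem.Dict.empty).getD tgt 0 ∨
              ((fd.getD tgt PySem.Dict.empty).getD a 0 = (fd.getD a PySem.Dict.empty).getD tgt 0 ∧
                (fd.getD tgt PySem.Dict.empty).getD "idx" 0 > (fd.getD a PySem.Dict.empty).getD "idx" 0))
          then (1 : Int) else 0) := by
        split_ifs <;> first | omega | tauto | (exfalso; tauto)
      rw [hstep]
      omega
  simpa using aux fr 0

-- ---- B's gift loop, decoupled into its two components ----

theorem pv_stB_fst : ∀ (l : List String)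
    (st : PySem.Dict (String × String) Int × PySem.Dict String Int),
    (l.foldl pvStepB st).1 = l.foldl (fun d g => d.modify (pvParse g) 0 (· + 1)) st.1 := by
  intro l
  induction l with
  | nil => intro st; rfl
  | cons g t ih =>
    intro st
    simp only [List.foldl_cons]
    rw [ih]
    rfl

theorem pv_stB_snd : ∀ (l : List String)
    (st : PySem.Dict (String × String) Int × PySem.Dict String Int),
    (l.foldl pvStepB st).2 =
      l.foldl (fun d g => (d.modify (pvParse g).1 0 (· + 1)).modify (pvParse g).2 0 (· - 1)) st.2 := by
  intro l
  induction l with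
  | nil => intro st; rfl
  | cons g t ih =>
    intro st
    simp only [List.foldl_cons]
    rw [ih]
    rfl

theorem pv_give_getD (gifts : List String)
    (e : PySem.Dict (String × String) Int) (p : String × String) :
    (gifts.foldl (fun d g => d.modify (pvParse g) 0 (· + 1)) e).getD p 0 =
      e.getD p 0 + ((gifts.map pvParse).count p : Int) := by
  have h := PySem.Dict.getD_foldl_modify_add_one (gifts.map pvParse) e p
  rw [List.foldl_map] at h
  exact h

theorem pv_idx_getD : ∀ (gifts : List String) (d : PySem.Dict String Int) (u : String),
    (gifts.foldl (fun d g => (d.modify (pvParse g).1 0 (· + 1)).modify (pvParse g).2 0 (· - 1)) d).getD u 0 =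
      d.getD u 0 + (((gifts.map pvParse).map Prod.fst).count u : Int) -
        (((gifts.map pvParse).map Prod.snd).count u : Int) := by
  intro gifts
  induction gifts with
  | nil => intro d u; simp
  | cons g t ih =>
    intro d u
    simp only [List.foldl_cons]
    rw [ih]
    have hstep : ((d.modify (pvParse g).1 0 (· + 1)).modify (pvParse g).2 0 (· - 1)).getD u 0 =
        d.getD u 0 + (if u = (pvParse g).1 then 1 else 0) - (if u = (pvParse g).2 then 1 else 0) := by
      simp only [PySem.Dict.getD_modify]
      split_ifs <;> first | omega | simp_all
    rw [hstep]
    simp only [List.map_map, List.map_cons, List.count_cons, Function.comp]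
    rcases hp : pvParse g with ⟨a, b⟩
    by_cases e1 : u = a <;> by_cases e2 : u = b
    · subst e1; rw [← e2]; simp; push_cast; omega
    · have e2' : b ≠ u := fun h => e2 h.symm
      subst e1; simp [e2, e2']; try push_cast; try omega
    · have e1' : a ≠ u := fun h => e1 h.symm
      subst e2; simp [e1, e1']; try push_cast; try omega
    · have e1' : a ≠ u := fun h => e1 h.symm
      have e2' : b ≠ u := fun h => e2 h.symm
      simp [e1, e2, e1', e2']; try push_cast; try omega

theorem pv_idx_keys : ∀ (gifts : List String) (d : PySem.Dict String Int),
    (∀ g ∈ gifts, (pvParse g).1 ∈ d.keys ∧ (pvParse g).2 ∈ d.keys) →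
    (gifts.foldl (fun d g => (d.modify (pvParse g).1 0 (· + 1)).modify (pvParse g).2 0 (· - 1)) d).keys =
      d.keys := by
  intro gifts
  induction gifts with
  | nil => intro d _; rfl
  | cons g t ih =>
    intro d hl
    have hg := hl g List.mem_cons_self
    simp only [List.foldl_cons]
    have h1 : (d.modify (pvParse g).1 0 (· + 1)).keys = d.keys := by
      rw [PySem.Dict.keys_modify, PySem.Dict.keys_insert_of_contains]
      exact (PySem.Dict.contains_iff_mem_keys _ _).mpr hg.1
    have h2 : ((d.modify (pvParse g).1 0 (· + 1)).modify (pvParse g).2 0 (· - 1)).keys = d.keys := by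
      rw [PySem.Dict.keys_modify, PySem.Dict.keys_insert_of_contains, h1]
      rw [PySem.Dict.contains_iff_mem_keys, h1]
      exact hg.2
    rw [ih _ (fun x hx => by rw [h2]; exact hl x (List.mem_cons_of_mem _ hx)), h2]

-- ---- B's rank loop ----

theorem pv_rank_pres : ∀ (l : List (Int × Int)) (r : PySem.Dict Int Int) (x : Int),
    r.contains x = true →
      (l.foldl pvRankStep r).getD x 0 = r.getD x 0 ∧ (l.foldl pvRankStep r).contains x = true := by
  intro l
  induction l with
  | nil => intro r x h; exact ⟨rfl, h⟩
  | cons iv t ih =>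
    intro r x hx
    simp only [List.foldl_cons]
    have hstep : (pvRankStep r iv).getD x 0 = r.getD x 0 ∧ (pvRankStep r iv).contains x = true := by
      unfold pvRankStep
      split_ifs with hc
      · exact ⟨rfl, hx⟩
      · by_cases hxv : x = iv.2
        · subst hxv; rw [hx] at hc; exact absurd rfl hc
        · constructor
          · rw [PySem.Dict.getD_insert, if_neg hxv]
          · rw [PySem.Dict.contains_insert]
            simp [hx]
    obtain ⟨h1, h2⟩ := ih (pvRankStep r iv) x hstep.2
    exact ⟨h1.trans hstep.1, h2⟩

theorem pv_rank_main : ∀ (s : List Int), s.Pairwise (· ≤ ·) →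
    ∀ (n : Int) (r : PySem.Dict Int Int) (x : Int), x ∈ s → r.contains x = false →
      ((PySem.List.enumerate s n).foldl pvRankStep r).getD x 0 =
        n + ((s.countP (fun y => decide (y < x)) : Nat) : Int) := by
  intro s
  induction s with
  | nil => intro _ n r x hx _; exact absurd hx (List.not_mem_nil)
  | cons a t ih =>
    intro hpw n r x hx hr
    have hle : ∀ y ∈ t, a ≤ y := fun y hy => (List.pairwise_cons.mp hpw).1 y hy
    have hpt : t.Pairwise (· ≤ ·) := (List.pairwise_cons.mp hpw).2
    rw [PySem.List.enumerate_cons, List.foldl_cons]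
    by_cases hxa : x = a
    · subst hxa
      have hstep : pvRankStep r (n, x) = r.insert x n := by
        unfold pvRankStep
        rw [if_neg (by simp [hr])]
      rw [hstep]
      have hc : (r.insert x n).contains x = true := PySem.Dict.contains_insert_self r x n
      rw [(pv_rank_pres _ _ x hc).1, PySem.Dict.getD_insert_self]
      have hcnt : (x :: t).countP (fun y => decide (y < x)) = 0 := by
        rw [List.countP_eq_zero]
        intro y hy
        rcases List.mem_cons.mp hy with h | h
        · subst h; simp
        · have := hle y h
          simp
          omega
      rw [hcnt]
      simp
    · have hxt : x ∈ t := by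
        rcases List.mem_cons.mp hx with h | h
        · exact absurd h hxa
        · exact h
      have hr' : (pvRankStep r (n, a)).contains x = false := by
        unfold pvRankStep
        split_ifs
        · exact hr
        · rw [PySem.Dict.contains_insert]
          simp [hxa, hr]
      rw [ih hpt (n + 1) _ x hxt hr']
      have hax : a < x := lt_of_le_of_ne (hle x hxt) (fun h => hxa h.symm)
      have hcnt : (a :: t).countP (fun y => decide (y < x)) =
          t.countP (fun y => decide (y < x)) + 1 := by
        rw [List.countP_cons]
        simp [hax]
      rw [hcnt]
      push_cast
      omega

-- ---- B's correction loop ----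

theorem pv_fix_step (give : PySem.Dict (String × String) Int) (idx : PySem.Dict String Int)
    (w : PySem.Dict String Int) (k : String × String) (x : String) :
    (pvFixStep give idx w (k, give.getD k 0)).getD x 0 = w.getD x 0 + pvContrib give idx x k := by
  rcases k with ⟨u, v⟩
  have gmod : ∀ (w' : PySem.Dict String Int) (c : String) (f : Int → Int),
      (w'.modify c 0 f).getD x 0 = if x = c then f (w'.getD x 0) else w'.getD x 0 := by
    intro w' c f
    rw [PySem.Dict.getD_modify]
    split_ifs with h
    · rw [h]
    · rfl
  unfold pvFixStep pvContrib
  dsimp only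
  by_cases hab : give.getD (u, v) 0 > give.getD (v, u) 0
  · rw [if_pos hab, if_pos hab]
    by_cases huv : u = v
    · exact absurd hab (by rw [huv]; omega)
    · by_cases h1 : idx.getD u 0 > idx.getD v 0
      · rw [if_pos h1, if_pos h1, gmod, gmod]
        split_ifs <;> omega
      · rw [if_neg h1, if_neg h1]
        by_cases h2 : idx.getD v 0 > idx.getD u 0
        · rw [if_pos h2, if_pos h2, gmod, gmod]
          split_ifs <;> first | omega | simp_all
        · rw [if_neg h2, if_neg h2, gmod]
          split_ifs <;> omega
  · rw [if_neg hab, if_neg hab]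
    omega

theorem pv_fix_fold (give : PySem.Dict (String × String) Int) (idx : PySem.Dict String Int) :
    ∀ (K : List (String × String)) (w : PySem.Dict String Int) (x : String),
      (K.foldl (fun w k => pvFixStep give idx w (k, give.getD k 0)) w).getD x 0 =
        w.getD x 0 + (K.map (pvContrib give idx x)).sum := by
  intro K
  induction K with
  | nil => intro w x; simp
  | cons k t ih =>
    intro w x
    simp only [List.foldl_cons, List.map_cons, List.sum_cons]
    rw [ih, pv_fix_step]
    omega

theorem pv_fix_keys (give : PySem.Dict (String × String) Int) (idx : PySem.Dict String Int) :
    ∀ (K : List ((String × String) × Int)) (w : PySem.Dict String Int),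
      (∀ kv ∈ K, kv.1.1 ∈ w.keys ∧ kv.1.2 ∈ w.keys) →
      (K.foldl (pvFixStep give idx) w).keys = w.keys := by
  intro K
  induction K with
  | nil => intro w _; rfl
  | cons kv t ih =>
    intro w hl
    have hg := hl kv List.mem_cons_self
    simp only [List.foldl_cons]
    have hkeep : ∀ (w' : PySem.Dict String Int) (k : String), k ∈ w'.keys →
        ∀ f, (w'.modify k 0 f).keys = w'.keys := by
      intro w' k hk f
      rw [PySem.Dict.keys_modify, PySem.Dict.keys_insert_of_contains]
      exact (PySem.Dict.contains_iff_mem_keys _ _).mpr hk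
    have hstep : (pvFixStep give idx w kv).keys = w.keys := by
      unfold pvFixStep
      dsimp only
      split_ifs with h1 h2 h3
      · rw [hkeep _ _ (by rw [hkeep _ _ hg.1] ; exact hg.1) _, hkeep _ _ hg.1]
      · rw [hkeep _ _ (by rw [hkeep _ _ hg.2] ; exact hg.1) _, hkeep _ _ hg.2]
      · rw [hkeep _ _ hg.1]
      · rfl
    rw [ih _ (fun x hx => by rw [hstep]; exact hl x (List.mem_cons_of_mem _ hx)), hstep]

-- ---- the correction sum, reindexed over friends ----

theorem pv_contrib_zero_of_out (give : PySem.Dict (String × String) Int)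
    (idx : PySem.Dict String Int) (x : String) (k : String × String)
    (h : x ≠ k.1 ∧ x ≠ k.2) : pvContrib give idx x k = 0 := by
  unfold pvContrib
  split_ifs <;> simp_all

theorem pv_contrib_zero_of_le (give : PySem.Dict (String × String) Int)
    (idx : PySem.Dict String Int) (x : String) (k : String × String)
    (h : ¬ give.getD k 0 > give.getD (k.2, k.1) 0) : pvContrib give idx x k = 0 := by
  unfold pvContrib
  rw [if_neg h]

theorem pv_contrib_sum (give : PySem.Dict (String × String) Int) (idx : PySem.Dict String Int)
    (K : List (String × String)) (hK : K.Nodup)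
    (friends : List String) (hfr : friends.Nodup)
    (hnn : ∀ p, 0 ≤ give.getD p 0)
    (hmemK : ∀ p, p ∈ K ↔ 0 < give.getD p 0)
    (hendp : ∀ p ∈ K, p.1 ∈ friends ∧ p.2 ∈ friends)
    (x : String) :
    (K.map (pvContrib give idx x)).sum =
      (friends.map (fun v => pvContrib give idx x (x, v) + pvContrib give idx x (v, x))).sum := by
  have hout : ∀ p, p ∉ K → pvContrib give idx x p = 0 := by
    intro p hp
    apply pv_contrib_zero_of_le
    have h1 : ¬ 0 < give.getD p 0 := fun h => hp ((hmemK p).mpr h)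
    have h2 := hnn (p.2, p.1)
    omega
  -- split each contribution by whether x is the first or the second component
  have hsplit : ∀ k, pvContrib give idx x k =
      (if k.1 = x then pvContrib give idx x k else 0) +
      (if k.2 = x ∧ k.1 ≠ x then pvContrib give idx x k else 0) := by
    intro k
    by_cases h1 : k.1 = x
    · simp [h1]
    · by_cases h2 : k.2 = x
      · simp [h1, h2, show x ≠ k.1 from fun h => h1 h.symm]
      · rw [if_neg h1, if_neg (by tauto),
          pv_contrib_zero_of_out give idx x k ⟨fun h => h1 h.symm, fun h => h2 h.symm⟩]
        omega
  rw [List.map_congr_left (fun k _ => hsplit k), PySem.List.sum_map_add_int]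
  -- first-component part
  have hpart1 : (K.map (fun k => if k.1 = x then pvContrib give idx x k else 0)).sum =
      (friends.map (fun v => pvContrib give idx x (x, v))).sum := by
    have hptw : ∀ k ∈ K, (if k.1 = x then pvContrib give idx x k else 0) =
        (friends.map (fun v => if k = (x, v) then pvContrib give idx x (x, v) else 0)).sum := by
      intro k hk
      by_cases h1 : k.1 = x
      · rw [if_pos h1]
        have hk2 : k = (x, k.2) := by rw [← h1]
        rw [hk2]
        have hmc : (friends.map (fun v => if (x, k.2) = (x, v) then pvContrib give idx x (x, v) else 0)) =
            friends.map (fun v => if v = k.2 then pvContrib give idx x (x, v) else 0) := by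
          apply List.map_congr_left
          intro v _
          by_cases hv : v = k.2
          · rw [if_pos (by rw [hv]), if_pos hv]
          · rw [if_neg (by simp [Prod.ext_iff]; intro h; exact absurd h.symm hv), if_neg hv]
        rw [hmc]
        exact (pv_sum_spike friends hfr k.2 (hendp k hk).2
          (fun v => pvContrib give idx x (x, v))).symm
      · rw [if_neg h1]
        symm
        apply List.sum_eq_zero
        intro y hy
        obtain ⟨v, hv, hvy⟩ := List.mem_map.mp hy
        rw [if_neg (by rintro rfl; exact h1 rfl)] at hvy
        omega
    rw [List.map_congr_left hptw, pv_sum_swap K friends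
      (fun k v => if k = (x, v) then pvContrib give idx x (x, v) else 0)]
    apply congrArg
    apply List.map_congr_left
    intro v _
    rw [pv_sum_ite_eq K hK (x, v) (pvContrib give idx x (x, v))]
    by_cases hm : (x, v) ∈ K
    · rw [if_pos hm]
    · rw [if_neg hm, hout _ hm]
  -- second-component part
  have hpart2 : (K.map (fun k => if k.2 = x ∧ k.1 ≠ x then pvContrib give idx x k else 0)).sum =
      (friends.map (fun v => pvContrib give idx x (v, x))).sum := by
    have hptw : ∀ k ∈ K, (if k.2 = x ∧ k.1 ≠ x then pvContrib give idx x k else 0) =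
        (friends.map (fun v => if k = (v, x) then pvContrib give idx x (v, x) else 0)).sum := by
      intro k hk
      by_cases h1 : k.2 = x ∧ k.1 ≠ x
      · rw [if_pos h1]
        have hk2 : k = (k.1, x) := by rw [← h1.1]
        rw [hk2]
        have hmc : (friends.map (fun v => if (k.1, x) = (v, x) then pvContrib give idx x (v, x) else 0)) =
            friends.map (fun v => if v = k.1 then pvContrib give idx x (v, x) else 0) := by
          apply List.map_congr_left
          intro v _
          by_cases hv : v = k.1
          · rw [if_pos (by rw [hv]), if_pos hv]
          · rw [if_neg (by simp [Prod.ext_iff]; intro h; exact absurd h.symm hv), if_neg hv]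
        rw [hmc]
        exact (pv_sum_spike friends hfr k.1 (hendp k hk).1
          (fun v => pvContrib give idx x (v, x))).symm
      · rw [if_neg h1]
        symm
        apply List.sum_eq_zero
        intro y hy
        obtain ⟨v, hv, hvy⟩ := List.mem_map.mp hy
        by_cases hkv : k = (v, x)
        · -- then k.2 = x, so k.1 = x must fail h1, i.e. k = (x, x), v = x
          have h2 : k.2 = x := by rw [hkv]
          have h1' : k.1 = x := by tauto
          have hvx : v = x := by rw [hkv] at h1'; exact h1'
          rw [if_pos hkv] at hvy
          have : pvContrib give idx x (v, x) = 0 := by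
            apply pv_contrib_zero_of_le
            simp [hvx]
          omega
        · rw [if_neg hkv] at hvy
          omega
    rw [List.map_congr_left hptw, pv_sum_swap K friends
      (fun k v => if k = (v, x) then pvContrib give idx x (v, x) else 0)]
    apply congrArg
    apply List.map_congr_left
    intro v _
    rw [pv_sum_ite_eq K hK (v, x) (pvContrib give idx x (v, x))]
    by_cases hm : (v, x) ∈ K
    · rw [if_pos hm]
    · rw [if_neg hm, hout _ hm]
  rw [hpart1, hpart2, ← PySem.List.sum_map_add_int]

-- countP of smaller indices as a 0/1 sum over friends
theorem pv_countP_sum (friends : List String) (f : String → Int) (c : Int) :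
    (((friends.map f).countP (fun y => decide (y < c)) : Nat) : Int) =
      (friends.map (fun v => if f v < c then (1 : Int) else 0)).sum := by
  induction friends with
  | nil => simp
  | cons a t ih =>
    simp only [List.map_cons, List.countP_cons, List.sum_cons]
    by_cases h : f a < c
    · simp only [h, decide_true, if_pos h]
      push_cast
      omega
    · simp only [h, decide_false, if_neg h]
      push_cast
      omega


-- the pointwise identity: index-rank baseline plus pair corrections = A's beating indicator
theorem pv_pointwise (gifts : List String) (give : PySem.Dict (String × String) Int)
    (idx : PySem.Dict String Int)
    (hG : ∀ u v, give.getD (u, v) 0 = pvG gifts u v) (hI : ∀ u, idx.getD u 0 = pvI gifts u)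
    (x v : String) :
    (if pvI gifts v < pvI gifts x then (1 : Int) else 0) +
      (pvContrib give idx x (x, v) + pvContrib give idx x (v, x)) =
      if x ≠ v ∧ pvWin gifts x v then 1 else 0 := by
  have hp : (0 : Int) ≤ pvG gifts x v := Int.natCast_nonneg _
  have hq : (0 : Int) ≤ pvG gifts v x := Int.natCast_nonneg _
  by_cases hxv : x = v
  · subst hxv
    unfold pvContrib
    simp
  · have hvx : v ≠ x := fun h => hxv h.symm
    have c1 : pvContrib give idx x (x, v) =
        if pvG gifts x v > pvG gifts v x then
          (if pvI gifts x > pvI gifts v then (0 : Int) else 1) else 0 := by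
      unfold pvContrib
      dsimp only
      simp only [hG, hI]
      simp [hxv, hvx]
      split_ifs <;> omega
    have c2 : pvContrib give idx x (v, x) =
        if pvG gifts v x > pvG gifts x v ∧ pvI gifts x > pvI gifts v then (-1 : Int) else 0 := by
      unfold pvContrib
      dsimp only
      simp only [hG, hI]
      simp [hxv, hvx]
      split_ifs <;> first | omega | simp_all
    have hrhs : (if x ≠ v ∧ pvWin gifts x v then (1 : Int) else 0) =
        if pvWin gifts x v then 1 else 0 := by
      by_cases hw : pvWin gifts x v
      · rw [if_pos ⟨hxv, hw⟩, if_pos hw]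
      · rw [if_neg (fun hc => hw hc.2), if_neg hw]
    rw [c1, c2, hrhs]
    unfold pvWin
    split_ifs <;> omega

-- ---- main equivalence on nonempty-gift inputs ----

theorem pv_main (friends gifts : List String) (hnd : friends.Nodup) (hidx : "idx" ∉ friends)
    (hg : ∀ g ∈ gifts, (PySem.Str.split₀ g).length = 2 ∧
      (PySem.Str.split₀ g).getD 0 "" ∈ friends ∧ (PySem.Str.split₀ g).getD 1 "" ∈ friends) :
    solution friends gifts = solution_alt friends gifts := by
  simp only [solution, solution_alt]
  have hparse : ∀ g ∈ gifts, (pvParse g).1 ∈ friends ∧ (pvParse g).2 ∈ friends :=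
    fun g hgm => ⟨(hg g hgm).2.1, (hg g hgm).2.2⟩
  -- A's dict after the gift loop
  set C := (friends.foldl (fun m v => m.insert v (0 : Int)) PySem.Dict.empty).insert "idx" 0
    with hC
  set fd0 := friends.foldl (fun d friend => d.insert friend C) PySem.Dict.empty with hfd0
  set fdF := gifts.foldl pvStepA fd0 with hfdF
  have hA_G : ∀ u ∈ friends, ∀ v ∈ friends,
      (fdF.getD u PySem.Dict.empty).getD v 0 = pvG gifts u v := by
    intro u hu v hv
    have hinit : (fd0.getD u PySem.Dict.empty).getD v 0 = 0 := by
      rw [hfd0, pv_getD_foldl_insertf (fun _ => C) PySem.Dict.empty friends PySem.Dict.empty u hu,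
        hC, PySem.Dict.getD_insert_of_ne _ _ _ (fun h => hidx (by rw [h] at hv; exact hv)),
        pv_getD_foldl_insertf (fun _ => (0 : Int)) 0 friends PySem.Dict.empty v hv]
    have := pv_A_loop_G friends hidx gifts hparse fd0 u v hu hv
    rw [hinit, zero_add] at this
    rw [hfdF]; exact this
  have hA_I : ∀ u ∈ friends,
      (fdF.getD u PySem.Dict.empty).getD "idx" 0 = pvI gifts u := by
    intro u hu
    have hinit : (fd0.getD u PySem.Dict.empty).getD "idx" 0 = 0 := by
      rw [hfd0, pv_getD_foldl_insertf (fun _ => C) PySem.Dict.empty friends PySem.Dict.empty u hu,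
        hC, PySem.Dict.getD_insert_self]
    have := pv_A_loop_I friends hidx gifts hparse fd0 u hu
    rw [hinit, zero_add] at this
    rw [hfdF]; exact this
  -- B's tallies
  set idx0 := friends.foldl (fun d f => d.insert f (0 : Int)) PySem.Dict.empty with hidx0
  set st := gifts.foldl pvStepB (PySem.Dict.empty, idx0) with hst
  have hgive : st.1 = gifts.foldl (fun d g => d.modify (pvParse g) 0 (· + 1)) PySem.Dict.empty :=
    pv_stB_fst gifts _
  have hidxd : st.2 =
      gifts.foldl (fun d g => (d.modify (pvParse g).1 0 (· + 1)).modify (pvParse g).2 0 (· - 1)) idx0 :=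
    pv_stB_snd gifts _
  have hB_G : ∀ p : String × String, st.1.getD p 0 = ((gifts.map pvParse).count p : Int) := by
    intro p
    rw [hgive, pv_give_getD, PySem.Dict.getD_empty]
    omega
  have hB_I : ∀ u : String, st.2.getD u 0 = pvI gifts u := by
    intro u
    have h0 : idx0.getD u 0 = 0 := by
      by_cases hu : u ∈ friends
      · exact pv_getD_foldl_insertf (fun _ => (0 : Int)) 0 friends PySem.Dict.empty u hu
      · rw [pv_getD_foldl_insertf_not_mem (fun _ => (0 : Int)) 0 friends PySem.Dict.empty u hu,
          PySem.Dict.getD_empty]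
    rw [hidxd, pv_idx_getD, h0, pvI]
    omega
  have hnn : ∀ p, 0 ≤ st.1.getD p 0 := by
    intro p
    rw [hB_G p]
    exact Int.natCast_nonneg _
  -- keys
  have hkeys_idx0 : idx0.keys = friends := by
    rw [hidx0, PySem.Dict.keys_foldl_insert friends (fun _ _ => (0 : Int)) PySem.Dict.empty]
    show PySem.Set.update PySem.Dict.empty.keys friends = friends
    have he : (PySem.Dict.empty : PySem.Dict String Int).keys = ([] : List String) := rfl
    rw [he]
    rw [PySem.Set.update_nil_left]
    exact PySem.Set.ofList_eq_self_of_nodup friends hnd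
  have hkeys_idx : st.2.keys = friends := by
    rw [hidxd, pv_idx_keys gifts idx0
      (fun g hgm => ⟨by rw [hkeys_idx0]; exact (hparse g hgm).1,
                     by rw [hkeys_idx0]; exact (hparse g hgm).2⟩), hkeys_idx0]
  have hKeq : st.1.keys = PySem.Set.ofList (gifts.map pvParse) := by
    rw [hgive, PySem.Dict.keys_foldl_modify_key gifts pvParse 0
      (fun _ _ => (· + 1)) PySem.Dict.empty]
    rw [PySem.Dict.keys_empty, PySem.Set.update_nil_left]
  have hKnd : st.1.keys.Nodup := by rw [hKeq]; exact PySem.Set.nodup_ofList _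
  have hmemK : ∀ p, p ∈ st.1.keys ↔ 0 < st.1.getD p 0 := by
    intro p
    rw [hKeq, PySem.Set.mem_ofList, hB_G p]
    constructor
    · intro h
      have := List.count_pos_iff.mpr h
      omega
    · intro h
      apply List.count_pos_iff.mp
      omega
  have hendp : ∀ p ∈ st.1.keys, p.1 ∈ friends ∧ p.2 ∈ friends := by
    intro p hp
    have hpm : p ∈ gifts.map pvParse := by rwa [hKeq, PySem.Set.mem_ofList] at hp
    obtain ⟨g, hgm, rfl⟩ := List.mem_map.mp hpm
    exact hparse g hgm
  -- the rank dict
  set s := PySem.List.sorted st.2.values (fun y => y) false with hs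
  have hvals_eq : st.2.values = friends.map (fun u => pvI gifts u) := by
    rw [PySem.Dict.values_eq_map_keys st.2 (by rw [hkeys_idx]; exact hnd) 0, hkeys_idx]
    exact List.map_congr_left (fun u _ => hB_I u)
  have hs_pairwise : s.Pairwise (· ≤ ·) := by
    have := PySem.List.sorted_pairwise st.2.values (fun y => y)
    simpa using this
  have hs_perm : s.Perm st.2.values := PySem.List.sorted_perm _ _ _
  set rank := (PySem.List.enumerate s).foldl pvRankStep PySem.Dict.empty with hrank
  have hrank_getD : ∀ x ∈ friends, rank.getD (pvI gifts x) 0 =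
      (((friends.map (fun v => pvI gifts v)).countP (fun y => decide (y < pvI gifts x)) : Nat) : Int) := by
    intro x hx
    have hmem : pvI gifts x ∈ s := by
      rw [hs, PySem.List.mem_sorted, hvals_eq]
      exact List.mem_map.mpr ⟨x, hx, rfl⟩
    have h0 : (PySem.Dict.empty : PySem.Dict Int Int).contains (pvI gifts x) = false :=
      PySem.Dict.contains_empty _
    rw [hrank, pv_rank_main s hs_pairwise 0 PySem.Dict.empty (pvI gifts x) hmem h0, zero_add,
      hs_perm.countP_eq, hvals_eq]
  -- the wins dict
  set wins0 := friends.foldl (fun w u => w.insert u (rank.getD (st.2.getD u 0) 0))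
    PySem.Dict.empty with hw0
  have hwins0 : ∀ x ∈ friends, wins0.getD x 0 = rank.getD (pvI gifts x) 0 := by
    intro x hx
    rw [hw0, pv_getD_foldl_insertf (fun u => rank.getD (st.2.getD u 0) 0) 0 friends
      PySem.Dict.empty x hx, hB_I x]
  have hkeys_w0 : wins0.keys = friends := by
    rw [hw0]
    have := PySem.Dict.keys_foldl_insert friends
      (fun _ u => rank.getD (st.2.getD u 0) 0) (PySem.Dict.empty : PySem.Dict String Int)
    rw [this, PySem.Dict.keys_empty, PySem.Set.update_nil_left,
      PySem.Set.ofList_eq_self_of_nodup friends hnd]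
  set winsF := st.1.items.foldl (pvFixStep st.1 st.2) wins0 with hwF
  have hitems : st.1.items = st.1.keys.map (fun k => (k, st.1.getD k 0)) :=
    PySem.Dict.items_eq_map_keys st.1 hKnd 0
  have hwF_fold : winsF = st.1.keys.foldl
      (fun w k => pvFixStep st.1 st.2 w (k, st.1.getD k 0)) wins0 := by
    rw [hwF, hitems, List.foldl_map]
  have hWx : ∀ x ∈ friends, winsF.getD x 0 =
      (friends.map (fun v => if x ≠ v ∧ pvWin gifts x v then (1 : Int) else 0)).sum := by
    intro x hx
    rw [hwF_fold, pv_fix_fold st.1 st.2 st.1.keys wins0 x, hwins0 x hx, hrank_getD x hx,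
      pv_contrib_sum st.1 st.2 st.1.keys hKnd friends hnd hnn hmemK hendp x,
      pv_countP_sum friends (fun v => pvI gifts v) (pvI gifts x), ← PySem.List.sum_map_add_int]
    apply congrArg
    apply List.map_congr_left
    intro v _
    exact pv_pointwise gifts st.1 st.2 (fun u v => hB_G (u, v)) hB_I x v
  -- keys and values of the final wins dict
  have hkeys_wF : winsF.keys = friends := by
    rw [hwF, pv_fix_keys st.1 st.2 st.1.items wins0 ?_, hkeys_w0]
    intro kv hkv
    rw [hkeys_w0]
    have : kv.1 ∈ st.1.keys := by
      rw [hitems] at hkv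
      obtain ⟨k, hk, hke⟩ := List.mem_map.mp hkv
      rw [← hke]
      exact hk
    exact hendp kv.1 this
  have hvalsF : winsF.values = friends.map (fun k => winsF.getD k 0) := by
    rw [PySem.Dict.values_eq_map_keys winsF (by rw [hkeys_wF]; exact hnd) 0, hkeys_wF]
  -- A's per-friend count agrees
  have hAx : ∀ x ∈ friends, pvCntA fdF friends x = winsF.getD x 0 := by
    intro x hx
    rw [pv_cntA_sum, hWx x hx]
    apply congrArg
    apply List.map_congr_left
    intro v hv
    rw [hA_G x hx v hv, hA_G v hv x hx, hA_I x hx, hA_I v hv]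
  -- both sides: running max over the same list of values
  have hL : friends.foldl (fun answer tgt => max answer (pvCntA fdF friends tgt)) 0 =
      (friends.map (fun tgt => pvCntA fdF friends tgt)).foldl max 0 :=
    List.foldl_map.symm
  rw [hL, hvalsF]
  have hlist : friends.map (fun tgt => pvCntA fdF friends tgt) =
      friends.map (fun k => winsF.getD k 0) :=
    List.map_congr_left (fun x hx => hAx x hx)
  apply pv_max_eq
  · intro y
    rw [hlist]
  · intro y hy
    obtain ⟨u, hu, hval⟩ := List.mem_map.mp hy
    rw [← hval, pv_cntA_sum]
    apply List.sum_nonneg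
    intro a ha
    obtain ⟨v, hv, hva⟩ := List.mem_map.mp ha
    rw [← hva]
    split_ifs <;> omega


-- ---- with no gifts, both programs return 0 whatever the friends list ----

theorem pv_A_empty (friends : List String) : solution friends [] = 0 := by
  simp only [solution, List.foldl_nil]
  set C := (friends.foldl (fun m v => m.insert v (0 : Int)) PySem.Dict.empty).insert "idx" 0
    with hC
  set fd0 := friends.foldl (fun d friend => d.insert friend C) PySem.Dict.empty with hfd0
  have hCzero : ∀ v : String, C.getD v 0 = 0 := by
    intro v
    by_cases hv : v = "idx"
    · rw [hC, hv, PySem.Dict.getD_insert_self]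
    · rw [hC, PySem.Dict.getD_insert_of_ne _ _ _ hv]
      by_cases hvf : v ∈ friends
      · rw [pv_getD_foldl_insertf (fun _ => (0 : Int)) 0 friends PySem.Dict.empty v hvf]
      · rw [pv_getD_foldl_insertf_not_mem (fun _ => (0 : Int)) 0 friends PySem.Dict.empty v hvf,
          PySem.Dict.getD_empty]
  have hfd0zero : ∀ u ∈ friends, ∀ v : String, (fd0.getD u PySem.Dict.empty).getD v 0 = 0 := by
    intro u hu v
    rw [hfd0, pv_getD_foldl_insertf (fun _ => C) PySem.Dict.empty friends PySem.Dict.empty u hu]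
    exact hCzero v
  have hcnt0 : ∀ x ∈ friends, pvCntA fd0 friends x = 0 := by
    intro x hx
    rw [pv_cntA_sum]
    have hmapz : (friends.map (fun frm =>
        if x ≠ frm ∧
            ((fd0.getD x PySem.Dict.empty).getD frm 0 > (fd0.getD frm PySem.Dict.empty).getD x 0 ∨
              ((fd0.getD x PySem.Dict.empty).getD frm 0 = (fd0.getD frm PySem.Dict.empty).getD x 0 ∧
                (fd0.getD x PySem.Dict.empty).getD "idx" 0 > (fd0.getD frm PySem.Dict.empty).getD "idx" 0))
        then (1 : Int) else 0)) = friends.map (fun _ => (0 : Int)) := by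
      apply List.map_congr_left
      intro v hv
      rw [hfd0zero x hx v, hfd0zero v hv x, hfd0zero x hx "idx", hfd0zero v hv "idx"]
      rw [if_neg (by omega)]
    rw [hmapz]
    simp
  rw [(List.foldl_map.symm :
    friends.foldl (fun answer tgt => max answer (pvCntA fd0 friends tgt)) 0 =
      (friends.map (fun tgt => pvCntA fd0 friends tgt)).foldl max 0)]
  obtain ⟨h1, h2, h3⟩ := pv_foldl_max_spec (friends.map (fun tgt => pvCntA fd0 friends tgt)) 0
  rcases h3 with h | h
  · exact h
  · obtain ⟨u, hu, hval⟩ := List.mem_map.mp h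
    rw [← hval]
    exact hcnt0 u hu

theorem pv_B_empty (friends : List String) : solution_alt friends [] = 0 := by
  simp only [solution_alt, List.foldl_nil]
  set idx0 := friends.foldl (fun d f => d.insert f (0 : Int)) PySem.Dict.empty with hidx0
  have hI0 : ∀ u, idx0.getD u 0 = 0 := by
    intro u
    by_cases hu : u ∈ friends
    · exact pv_getD_foldl_insertf (fun _ => (0 : Int)) 0 friends PySem.Dict.empty u hu
    · rw [pv_getD_foldl_insertf_not_mem (fun _ => (0 : Int)) 0 friends PySem.Dict.empty u hu,
        PySem.Dict.getD_empty]
  have hkeys0 : idx0.keys = PySem.Set.ofList friends := by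
    rw [hidx0, PySem.Dict.keys_foldl_insert friends (fun _ _ => (0 : Int)) PySem.Dict.empty,
      PySem.Dict.keys_empty, PySem.Set.update_nil_left]
  have hknd : idx0.keys.Nodup := by rw [hkeys0]; exact PySem.Set.nodup_ofList _
  have hvals : idx0.values = idx0.keys.map (fun _ => (0 : Int)) := by
    rw [PySem.Dict.values_eq_map_keys idx0 hknd 0]
    exact List.map_congr_left (fun u _ => hI0 u)
  set s := PySem.List.sorted idx0.values (fun y => y) false with hs
  have hsz : ∀ y ∈ s, y = 0 := by
    intro y hy
    rw [hs, PySem.List.mem_sorted, hvals] at hy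
    obtain ⟨u, _, hval⟩ := List.mem_map.mp hy
    omega
  set rank := (PySem.List.enumerate s).foldl pvRankStep PySem.Dict.empty with hrank
  have hrank0 : friends ≠ [] → rank.getD 0 0 = 0 := by
    intro hne
    have hmem : (0 : Int) ∈ s := by
      rcases hf : friends with _ | ⟨a, t⟩
      · exact absurd hf hne
      · have ha : a ∈ idx0.keys := by
          rw [hkeys0, PySem.Set.mem_ofList, hf]
          exact List.mem_cons_self
        have : (0 : Int) ∈ idx0.values := by
          rw [hvals]
          exact List.mem_map.mpr ⟨a, ha, rfl⟩
        rw [hs, PySem.List.mem_sorted]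
        exact this
    have hpw : s.Pairwise (· ≤ ·) := by
      apply List.pairwise_of_forall_mem_list
      intro a ha b hb
      rw [hsz a ha, hsz b hb]
    rw [hrank, pv_rank_main s hpw 0 PySem.Dict.empty 0 hmem (PySem.Dict.contains_empty _),
      zero_add]
    have : s.countP (fun y => decide (y < 0)) = 0 := by
      rw [List.countP_eq_zero]
      intro y hy
      rw [hsz y hy]
      simp
    rw [this]
    simp
  set wins0 := friends.foldl (fun w u => w.insert u (rank.getD (idx0.getD u 0) 0))
    PySem.Dict.empty with hw0
  have hitems : (PySem.Dict.empty : PySem.Dict (String × String) Int).items = [] := rfl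
  rw [hitems, List.foldl_nil]
  have hkeysw : wins0.keys = PySem.Set.ofList friends := by
    rw [hw0]
    have := PySem.Dict.keys_foldl_insert friends
      (fun _ u => rank.getD (idx0.getD u 0) 0) (PySem.Dict.empty : PySem.Dict String Int)
    rw [this, PySem.Dict.keys_empty, PySem.Set.update_nil_left]
  have hwnd : wins0.keys.Nodup := by rw [hkeysw]; exact PySem.Set.nodup_ofList _
  have hvw : wins0.values = wins0.keys.map (fun _ => (0 : Int)) := by
    rw [PySem.Dict.values_eq_map_keys wins0 hwnd 0]
    apply List.map_congr_left
    intro u hu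
    have huf : u ∈ friends := by
      rw [hkeysw, PySem.Set.mem_ofList] at hu
      exact hu
    have hne : friends ≠ [] := by
      intro h
      rw [h] at huf
      exact absurd huf (List.not_mem_nil)
    rw [hw0, pv_getD_foldl_insertf (fun u => rank.getD (idx0.getD u 0) 0) 0 friends
      PySem.Dict.empty u huf, hI0 u, hrank0 hne]
  rw [hvw]
  rcases hk : wins0.keys with _ | ⟨a, t⟩
  · rfl
  · simp only [List.map_cons]
    rw [PySem.List.max?_id_cons 0 (t.map (fun _ => (0 : Int)))]
    obtain ⟨h1, h2, h3⟩ := pv_foldl_max_spec (t.map (fun _ => (0 : Int))) 0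
    simp only [Option.getD_some]
    rcases h3 with h | h
    · rw [h]
    · obtain ⟨u, hu, hval⟩ := List.mem_map.mp h
      rw [← hval]

-- ===== VERDICT (by name: the statement is the Claim_ definition above) =====
theorem solution_spec : Claim_equal_solution := by
  intro friends gifts _ hPre
  show solution friends gifts = solution_alt friends gifts
  rcases hPre with ⟨hcorner, hg⟩
  rcases hcorner with hnil | ⟨hnd, hidx⟩
  · subst hnil
    rw [pv_A_empty, pv_B_empty]
  · exact pv_main friends gifts hnd hidx hg
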